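-- pv_equiv track=rewrite | github.com/himi1/Codefights | Tournaments/CodeMaster'sTourneySolutionsPart3.py | prefixSumsToSuffixSums
-- ===== SOURCE A (Python) =====
-- def prefixSumsToSuffixSums(prefixSums):
--     def helper(prefixSums):
--         prefixSums = list(reversed(prefixSums))
--         return list(reversed([a - b for (a, b) in zip(prefixSums, prefixSums[1:])] + [prefixSums[-1]]))
--
--     prefixSums = helper(prefixSums)
--     t = []
--     for i in range(len(prefixSums)):
--         t.append(sum(prefixSums[i:]))
--     return t
-- ===== SOURCE B (Python) =====
-- def prefixSumsToSuffixSums(prefixSums):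
--     if not prefixSums:
--         return []
--     last = prefixSums[-1]
--     return [last] + [last - p for p in prefixSums[:-1]]
-- ===== Notes on version B (the rewrite author's own statement) =====
-- stated objective: faster
-- what changed: A reconstructs the original values from the prefix sums and then re-sums a slice for every index (quadratic); B uses the identity that each suffix sum equals the last prefix sum minus the preceding prefix sum, emitting all answers in one linear pass with no slicing or re-summing.
import Mathlib
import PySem

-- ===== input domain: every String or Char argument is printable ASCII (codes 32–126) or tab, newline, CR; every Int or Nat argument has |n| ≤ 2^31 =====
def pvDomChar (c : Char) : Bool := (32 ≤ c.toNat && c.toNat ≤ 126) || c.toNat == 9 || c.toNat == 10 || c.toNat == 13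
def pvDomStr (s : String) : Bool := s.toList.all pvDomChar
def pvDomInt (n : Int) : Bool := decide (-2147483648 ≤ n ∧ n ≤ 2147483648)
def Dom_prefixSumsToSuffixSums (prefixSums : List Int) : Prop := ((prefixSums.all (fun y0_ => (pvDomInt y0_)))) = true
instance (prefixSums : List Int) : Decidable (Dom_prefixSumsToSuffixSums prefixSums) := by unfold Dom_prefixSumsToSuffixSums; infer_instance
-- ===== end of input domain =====

-- B replaces A's quadratic rebuild-the-values-then-re-sum-every-slice scheme by the
-- linear identity suffixSum[i] = prefixSums[-1] - prefixSums[i-1] (objective: faster).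

-- ===== PORT A =====
def prefixSumsToSuffixSums (prefixSums : List Int) : List Int :=
  -- helper: reverse, adjacent differences of the reversed list plus its last element, reversed back
  let r := prefixSums.reverse
  let ps := ((r.zip (PySem.List.slice r (some 1) none)).map (fun ab => ab.1 - ab.2)
              ++ [PySem.List.pyGetD r (-1) 0]).reverse   -- last element: IndexError on the empty list, excluded by Pre_
  -- for i in range(len(ps)): t.append(sum(ps[i:]))
  (PySem.List.pyRange 0 (ps.length : Int) 1).foldl
    (fun t i => t ++ [(PySem.List.slice ps (some i) none).sum]) []

-- ===== PORT B =====
def prefixSumsToSuffixSums_alt (prefixSums : List Int) : List Int :=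
  if prefixSums = [] then []
  else
    let last := PySem.List.pyGetD prefixSums (-1) 0
    last :: (PySem.List.slice prefixSums none (some (-1))).map (fun p => last - p)

-- ===== PRECONDITION & SPEC =====
-- Pre_ excludes only the empty list, on which A raises IndexError taking the last element.
def Pre_prefixSumsToSuffixSums (prefixSums : List Int) : Prop := prefixSums ≠ []
instance (prefixSums : List Int) : Decidable (Pre_prefixSumsToSuffixSums prefixSums) := by unfold Pre_prefixSumsToSuffixSums; infer_instance
def pvWitness_prefixSumsToSuffixSums : List Int := [1, 3, 6, 10]

def Spec_prefixSumsToSuffixSums (prefixSums : List Int) (out : List Int) : Prop := out = prefixSumsToSuffixSums_alt prefixSums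
instance (prefixSums : List Int) (out : List Int) : Decidable (Spec_prefixSumsToSuffixSums prefixSums out) := by unfold Spec_prefixSumsToSuffixSums; infer_instance

-- ===== CLAIM (what is proved, stated in full; the proofs are below) =====
def Claim_equal_prefixSumsToSuffixSums : Prop := ∀ (prefixSums : List Int), Dom_prefixSumsToSuffixSums prefixSums → Pre_prefixSumsToSuffixSums prefixSums → Spec_prefixSumsToSuffixSums prefixSums (prefixSumsToSuffixSums prefixSums)

-- ===== LEMMAS AND PROOFS =====

theorem zipSub_append_last (t : List Int) (b c : Int) :
    List.zipWith (fun p q => q - p) (b :: (t ++ [c])) (t ++ [c])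
      = List.zipWith (fun p q => q - p) (b :: t) t ++ [c - t.getLastD b] := by
  induction t generalizing b with
  | nil => simp
  | cons e t' ih => simpa [List.getLast?_cons] using ih e

theorem adjacent_reverse (ps : List Int) :
    List.zipWith (fun p q => p - q) ps.reverse ps.reverse.tail
      = (List.zipWith (fun p q => q - p) ps ps.tail).reverse := by
  induction ps using List.reverseRecOn with
  | nil => simp
  | append_singleton ps' c ih =>
    cases ps' with
    | nil => simp
    | cons b t =>
      rw [List.reverse_append]
      simp only [List.reverse_singleton, List.singleton_append, List.tail_cons]
      rcases hX : (b :: t).reverse with _ | ⟨h, X'⟩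
      · simp at hX
      · have hh : h = t.getLastD b := by
          have h2 := List.head?_reverse (l := b :: t)
          rw [hX] at h2
          simp [List.getLast?_cons] at h2
          simp [List.getLastD_eq_getLast?, h2.symm]
        subst hh
        rw [hX] at ih
        simp only [List.tail_cons] at ih
        have hps : (b :: t) ++ [c] = b :: (t ++ [c]) := rfl
        rw [hps, List.tail_cons, zipSub_append_last, List.reverse_append]
        simpa [List.getLastD_eq_getLast?] using ih

-- the helper's value: it reconstructs the original array of values
theorem structL (a : Int) (rest : List Int) :
    (((((a :: rest).reverse).zip ((a :: rest).reverse.tail)).map (fun ab => ab.1 - ab.2))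
        ++ [PySem.List.pyGetD (a :: rest).reverse (-1) 0]).reverse
      = a :: List.zipWith (fun p q => q - p) (a :: rest) rest := by
  have hz : ∀ (X Y : List Int), (X.zip Y).map (fun ab => ab.1 - ab.2)
      = List.zipWith (fun p q => p - q) X Y := by
    intro X Y; simp [List.zip, List.map_zipWith]
  rw [hz, adjacent_reverse]
  have hrev : (a :: rest).reverse = rest.reverse ++ [a] := by simp
  rw [hrev, PySem.List.pyGetD_neg_one_append_singleton]
  simp

-- suffix sums of the adjacent-differences list telescope
theorem drop_zipWith_sum : ∀ (xs : List Int) (a : Int) (j : Nat), j ≤ xs.length →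
    ((List.zipWith (fun p q => q - p) (a :: xs) xs).drop j).sum
      = xs.getLastD a - (a :: xs).getD j 0 := by
  intro xs
  induction xs with
  | nil =>
    intro a j hj
    have hj0 : j = 0 := by simpa using hj
    subst hj0; simp
  | cons b t ih =>
    intro a j hj
    cases j with
    | zero =>
      have h0 := ih b 0 (by omega)
      simp only [List.drop_zero] at h0 ⊢
      simp only [List.zipWith_cons_cons, List.sum_cons, h0]
      simp [List.getLastD_eq_getLast?, List.getLast?_cons]
    | succ j =>
      have h1 := ih b j (by simpa using hj)
      simp only [List.zipWith_cons_cons, List.drop_succ_cons, h1]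
      simp [List.getLastD_eq_getLast?, List.getLast?_cons]

theorem map_getD_range_dropLast : ∀ (xs : List Int) (f : Int → Int),
    (List.range (xs.length - 1)).map (fun j => f (xs.getD j 0)) = xs.dropLast.map f := by
  intro xs
  induction xs with
  | nil => simp
  | cons a xs ih =>
    intro f
    cases xs with
    | nil => simp
    | cons b t =>
      have hlen : (a :: b :: t).length - 1 = (b :: t).length - 1 + 1 := by simp
      rw [hlen, List.range_succ_eq_map, List.map_cons, List.map_map]
      have h2 : ((fun j => f ((a :: b :: t).getD j 0)) ∘ Nat.succ)
          = fun j => f ((b :: t).getD j 0) := by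
        funext j; simp
      rw [h2, ih f]
      simp

-- A in closed suffix-sum-of-differences form
theorem A_eq_map (a : Int) (rest : List Int) :
    prefixSumsToSuffixSums (a :: rest)
      = (List.range (rest.length + 1)).map
          (fun k => ((a :: List.zipWith (fun p q => q - p) (a :: rest) rest).drop k).sum) := by
  unfold prefixSumsToSuffixSums
  simp only [PySem.List.slice_from_one, structL]
  rw [PySem.List.foldl_append_singleton_eq_map, PySem.List.pyRange_one, List.map_map]
  have hlen : (((a :: List.zipWith (fun p q => q - p) (a :: rest) rest).length : Int) - 0).toNat
      = rest.length + 1 := by simp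
  rw [hlen]
  apply List.map_congr_left
  intro k hk
  simp only [Function.comp]
  rw [show ((0:Int) + (k:Int)) = ((k:Nat):Int) by omega, PySem.List.slice_from_natCast]

theorem prefixSumsToSuffixSums_spec : Claim_equal_prefixSumsToSuffixSums := by
  intro ps _ hpre
  unfold Spec_prefixSumsToSuffixSums
  obtain ⟨a, rest, rfl⟩ : ∃ a rest, ps = a :: rest := by
    cases ps with
    | nil => exact absurd rfl hpre
    | cons a rest => exact ⟨a, rest, rfl⟩
  rw [A_eq_map]
  unfold prefixSumsToSuffixSums_alt
  rw [if_neg hpre]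
  rw [PySem.List.pyGetD_neg_one (a :: rest) 0 hpre, PySem.List.slice_to_neg_one]
  have hlast : (a :: rest).getLast hpre = rest.getLastD a := List.getLast_eq_getLastD hpre
  rw [hlast]
  rw [List.range_succ_eq_map, List.map_cons, List.map_map]
  congr 1
  · -- head: sum of the whole reconstructed list
    have h0 := drop_zipWith_sum rest a 0 (by omega)
    simp only [List.drop_zero] at h0
    simp [h0]
  · -- tail: each suffix sum telescopes to last - prefixSums[k]
    have hmap : ∀ k ∈ List.range rest.length,
        ((fun k => ((a :: List.zipWith (fun p q => q - p) (a :: rest) rest).drop k).sum) ∘ Nat.succ) k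
          = (fun j => rest.getLastD a - ((a :: rest).getD j 0)) k := by
      intro k hk
      have hk' : k ≤ rest.length := by simp at hk; omega
      simp only [Function.comp, List.drop_succ_cons]
      exact drop_zipWith_sum rest a k hk'
    rw [List.map_congr_left hmap]
    have := map_getD_range_dropLast (a :: rest) (fun p => rest.getLastD a - p)
    simpa using this
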